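-- pv_equiv track=rewrite | github.com/AventixQ/scrap_classify | classify_position/classify_gs.py | classify_lvl
-- ===== SOURCE A (Python) =====
-- def classify_lvl(position):
--         if any(word in position for word in ["head", "lead", "director", "chief"]) and not "service" in position:
--             category = "lead/head/director"
--         elif any(word in position for word in ["owner", "ceo", "founder", "vp", "partner", "vice", "cfo"]) and not "service" in position:
--             category = "owner/ceo/founder/vp"
--         elif any(word in position for word in ["manager", "management", "pm"]):
--             category = "manager"
--         elif any(word in position for word in ["intern", "junior", "entry", "student", "trainee"]):
--             category = "entry lvl"
--         elif any(word in position for word in ["senior", "principal", "expert", "specialist", "scrum"]):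
--             category = "senior/expert/specialist"
--         elif any(word in position for word in ["assistant", "assist", "mid"]):
--             category = "mid"
--         else:
--             category=''
--         return category
-- ===== SOURCE B (Python) =====
-- CATEGORIES = ["lead/head/director", "owner/ceo/founder/vp", "manager",
--               "entry lvl", "senior/expert/specialist", "mid"]
--
-- # flat keyword -> priority map; priorities 0 and 1 are suppressed by "service"
-- PRIORITY = {
--     "head": 0, "lead": 0, "director": 0, "chief": 0,
--     "owner": 1, "ceo": 1, "founder": 1, "vp": 1, "partner": 1, "vice": 1, "cfo": 1,
--     "manager": 2, "management": 2, "pm": 2,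
--     "intern": 3, "junior": 3, "entry": 3, "student": 3, "trainee": 3,
--     "senior": 4, "principal": 4, "expert": 4, "specialist": 4, "scrum": 4,
--     "assistant": 5, "assist": 5, "mid": 5,
-- }
--
-- def classify_lvl(position):
--     service = "service" in position
--     matched = [p for w, p in PRIORITY.items()
--                if w in position and not (service and p < 2)]
--     return CATEGORIES[min(matched)] if matched else ''
-- ===== Notes on version B (the rewrite author's own statement) =====
-- stated objective: alternative
-- what changed: Replaces the ordered six-branch if/elif chain by a flat keyword-to-priority map: B collects the priorities of all matched keywords (dropping priorities 0-1 when 'service' appears) and returns the category at the minimum matched priority, instead of testing rule groups in order.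
import Mathlib
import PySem

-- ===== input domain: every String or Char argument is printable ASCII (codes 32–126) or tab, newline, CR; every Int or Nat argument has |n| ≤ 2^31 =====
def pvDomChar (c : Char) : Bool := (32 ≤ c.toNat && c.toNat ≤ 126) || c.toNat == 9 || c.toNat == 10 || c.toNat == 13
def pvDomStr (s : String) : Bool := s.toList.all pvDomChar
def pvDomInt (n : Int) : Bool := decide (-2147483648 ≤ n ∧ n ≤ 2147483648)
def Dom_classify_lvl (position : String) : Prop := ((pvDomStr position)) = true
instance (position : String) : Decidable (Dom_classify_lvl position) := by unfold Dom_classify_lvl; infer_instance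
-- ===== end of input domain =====

-- B replaces the ordered if/elif chain by a flat keyword->priority map: it collects all matched priorities and returns the category of the minimum; objective: alternative.


-- ===== PORT A =====
-- A: if/elif chain; 'word in position' = substring test (PySem.Str.isIn)
def classify_lvl (position : String) : String :=
  if ["head", "lead", "director", "chief"].any (fun w => PySem.Str.isIn w position)
      && !(PySem.Str.isIn "service" position) then "lead/head/director"
  else if ["owner", "ceo", "founder", "vp", "partner", "vice", "cfo"].any (fun w => PySem.Str.isIn w position)
      && !(PySem.Str.isIn "service" position) then "owner/ceo/founder/vp"
  else if ["manager", "management", "pm"].any (fun w => PySem.Str.isIn w position) then "manager"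
  else if ["intern", "junior", "entry", "student", "trainee"].any (fun w => PySem.Str.isIn w position) then "entry lvl"
  else if ["senior", "principal", "expert", "specialist", "scrum"].any (fun w => PySem.Str.isIn w position) then "senior/expert/specialist"
  else if ["assistant", "assist", "mid"].any (fun w => PySem.Str.isIn w position) then "mid"
  else ""

-- ===== PORT B =====
-- B: flat keyword -> priority map; min matched priority indexes the category list
def pvCats : List String :=
  ["lead/head/director", "owner/ceo/founder/vp", "manager",
   "entry lvl", "senior/expert/specialist", "mid"]

def pvPriority : List (String × Nat) :=
  [("head", 0), ("lead", 0), ("director", 0), ("chief", 0),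
   ("owner", 1), ("ceo", 1), ("founder", 1), ("vp", 1), ("partner", 1), ("vice", 1), ("cfo", 1),
   ("manager", 2), ("management", 2), ("pm", 2),
   ("intern", 3), ("junior", 3), ("entry", 3), ("student", 3), ("trainee", 3),
   ("senior", 4), ("principal", 4), ("expert", 4), ("specialist", 4), ("scrum", 4),
   ("assistant", 5), ("assist", 5), ("mid", 5)]

def classify_lvl_alt (position : String) : String :=
  let service := PySem.Str.isIn "service" position
  let matched := (pvPriority.filter
      (fun wp => PySem.Str.isIn wp.1 position && !(service && decide (wp.2 < 2)))).map Prod.snd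
  match matched.min? with
  | some m => pvCats.getD m ""
  | none => ""

-- ===== PRECONDITION & SPEC =====
def Spec_classify_lvl (position : String) (out : String) : Prop := out = classify_lvl_alt position
instance (position : String) (out : String) : Decidable (Spec_classify_lvl position out) := by unfold Spec_classify_lvl; infer_instance

-- ===== CLAIM (what is proved, stated in full; the proofs are below) =====
def Claim_equal_classify_lvl : Prop := ∀ (position : String), Dom_classify_lvl position → Spec_classify_lvl position (classify_lvl position)

-- ===== LEMMAS AND PROOFS =====

-- mapping a group to constant priority, filtering, and projecting gives a replicate
lemma pv_filt_map (c : String × Nat → Bool) (i : Nat) (gs : List String) :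
    ((gs.map (fun w => (w, i))).filter c).map Prod.snd
      = List.replicate (gs.countP (fun w => c (w, i))) i := by
  induction gs with
  | nil => simp
  | cons w ws ih =>
    by_cases h : c (w, i) <;>
      simp [h, ih, List.replicate_succ]

lemma pv_foldl_min_const (a : Nat) (l : List Nat) (h : ∀ x ∈ l, a ≤ x) :
    l.foldl min a = a := by
  induction l generalizing a with
  | nil => rfl
  | cons x xs ih =>
    have hx : min a x = a := by
      have := h x (by simp)
      omega
    simp only [List.foldl, hx]
    exact ih a (fun y hy => h y (by simp [hy]))

lemma pv_min?_replicate_append (k a : Nat) (l : List Nat) (h : ∀ x ∈ l, a ≤ x) :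
    (List.replicate k a ++ l).min? = if k = 0 then l.min? else some a := by
  cases k with
  | zero => simp
  | succ k' =>
    simp only [List.replicate_succ, List.cons_append, List.min?, Nat.succ_ne_zero, if_false]
    congr 1
    apply pv_foldl_min_const
    intro x hx
    rcases List.mem_append.mp hx with hx | hx
    · simp [List.eq_of_mem_replicate hx]
    · exact h x hx

lemma pv_min?_replicate (k a : Nat) :
    (List.replicate k a).min? = if k = 0 then none else some a := by
  simpa using pv_min?_replicate_append k a [] (by simp)

-- ===== VERDICT (by name: the statement is the Claim_ definition above) =====
theorem classify_lvl_spec : Claim_equal_classify_lvl := by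
  intro position _
  unfold Spec_classify_lvl classify_lvl classify_lvl_alt
  set P := fun w => PySem.Str.isIn w position with hP
  have e : ∀ l : List String, l.countP (fun w => P w) = 0 ↔ l.any P = false := by
    intro l
    rw [List.countP_eq_zero, List.any_eq_false]
  have hsplit : pvPriority =
      (["head", "lead", "director", "chief"].map (fun w => (w, (0:Nat))))
      ++ ((["owner", "ceo", "founder", "vp", "partner", "vice", "cfo"].map (fun w => (w, (1:Nat))))
      ++ ((["manager", "management", "pm"].map (fun w => (w, (2:Nat))))
      ++ ((["intern", "junior", "entry", "student", "trainee"].map (fun w => (w, (3:Nat))))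
      ++ ((["senior", "principal", "expert", "specialist", "scrum"].map (fun w => (w, (4:Nat))))
      ++ (["assistant", "assist", "mid"].map (fun w => (w, (5:Nat)))))))) := rfl
  rw [hsplit]
  cases hs : PySem.Str.isIn "service" position with
  | false =>
    simp only [List.filter_append, List.map_append, pv_filt_map, Bool.false_and,
      Bool.not_false, Bool.and_true, ← hP]
    clear hP hsplit hs
    clear_value P
    rw [pv_min?_replicate_append _ 0 _ (by intro x hx; simp [List.mem_append, List.mem_replicate] at hx; omega),
        pv_min?_replicate_append _ 1 _ (by intro x hx; simp [List.mem_append, List.mem_replicate] at hx; omega),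
        pv_min?_replicate_append _ 2 _ (by intro x hx; simp [List.mem_append, List.mem_replicate] at hx; omega),
        pv_min?_replicate_append _ 3 _ (by intro x hx; simp [List.mem_append, List.mem_replicate] at hx; omega),
        pv_min?_replicate_append _ 4 _ (by intro x hx; simp [List.mem_replicate] at hx; omega),
        pv_min?_replicate]
    simp only [e]
    generalize ["head", "lead", "director", "chief"].any P = b0
    generalize ["owner", "ceo", "founder", "vp", "partner", "vice", "cfo"].any P = b1
    generalize ["manager", "management", "pm"].any P = b2
    generalize ["intern", "junior", "entry", "student", "trainee"].any P = b3
    generalize ["senior", "principal", "expert", "specialist", "scrum"].any P = b4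
    generalize ["assistant", "assist", "mid"].any P = b5
    cases b0 <;> cases b1 <;> cases b2 <;> cases b3 <;> cases b4 <;> cases b5 <;> rfl
  | true =>
    simp only [List.filter_append, List.map_append, pv_filt_map, Bool.true_and,
      (show decide ((0:Nat) < 2) = true from rfl), (show decide ((1:Nat) < 2) = true from rfl),
      (show decide ((2:Nat) < 2) = false from rfl), (show decide ((3:Nat) < 2) = false from rfl),
      (show decide ((4:Nat) < 2) = false from rfl), (show decide ((5:Nat) < 2) = false from rfl),
      Bool.not_true, Bool.not_false, Bool.and_false, Bool.and_true,
      List.countP_false, Function.const_apply, List.replicate_zero, List.nil_append, ← hP]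
    clear hP hsplit hs
    clear_value P
    rw [pv_min?_replicate_append _ 2 _ (by intro x hx; simp [List.mem_append, List.mem_replicate] at hx; omega),
        pv_min?_replicate_append _ 3 _ (by intro x hx; simp [List.mem_append, List.mem_replicate] at hx; omega),
        pv_min?_replicate_append _ 4 _ (by intro x hx; simp [List.mem_replicate] at hx; omega),
        pv_min?_replicate]
    simp only [e]
    generalize ["manager", "management", "pm"].any P = b2
    generalize ["intern", "junior", "entry", "student", "trainee"].any P = b3
    generalize ["senior", "principal", "expert", "specialist", "scrum"].any P = b4
    generalize ["assistant", "assist", "mid"].any P = b5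
    cases b2 <;> cases b3 <;> cases b4 <;> cases b5 <;> rfl
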